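-- pv_equiv track=rewrite | github.com/wajahattt-dev/AI-Research-Analysis-System | agents/comparison_agent.py | _categorize_methodologies
-- ===== SOURCE A (Python) =====
-- from typing import Dict, List, Any
--
-- def _categorize_methodologies(methodologies: List[str]) -> Dict[str, int]:
--     """Categorize methodologies by type."""
--     categories = {
--         "experimental": 0,
--         "observational": 0,
--         "theoretical": 0,
--         "review": 0,
--         "case_study": 0,
--         "other": 0
--     }
--
--     for methodology in methodologies:
--         methodology_lower = methodology.lower()
--
--         if any(word in methodology_lower for word in ["experiment", "trial", "test"]):
--             categories["experimental"] += 1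
--         elif any(word in methodology_lower for word in ["observe", "survey", "interview"]):
--             categories["observational"] += 1
--         elif any(word in methodology_lower for word in ["theory", "model", "framework"]):
--             categories["theoretical"] += 1
--         elif any(word in methodology_lower for word in ["review", "meta-analysis", "systematic"]):
--             categories["review"] += 1
--         elif any(word in methodology_lower for word in ["case", "study", "example"]):
--             categories["case_study"] += 1
--         else:
--             categories["other"] += 1
--
--     return categories
-- ===== SOURCE B (Python) =====
-- # Category-major staged filtering: loop over categories, count matches in the
-- # remaining pool and remove them; whatever survives all stages is "other".
-- _TABLE = [
--     ("experimental", ["experiment", "trial", "test"]),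
--     ("observational", ["observe", "survey", "interview"]),
--     ("theoretical", ["theory", "model", "framework"]),
--     ("review", ["review", "meta-analysis", "systematic"]),
--     ("case_study", ["case", "study", "example"]),
-- ]
--
-- def _categorize_methodologies(methodologies):
--     remaining = [m.lower() for m in methodologies]
--     categories = {}
--     for category, words in _TABLE:
--         categories[category] = sum(1 for t in remaining if any(w in t for w in words))
--         remaining = [t for t in remaining if not any(w in t for w in words)]
--     categories["other"] = len(remaining)
--     return categories
-- ===== Notes on version B (the rewrite author's own statement) =====
-- stated objective: alternative
-- what changed: Replaces A's item-major pass (if/elif chain incrementing a counter dict per methodology) with a category-major algorithm: for each category in order it counts matches in a shrinking pool of lowercased strings and filters them out, the survivors of all stages being 'other'.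
import Mathlib
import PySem

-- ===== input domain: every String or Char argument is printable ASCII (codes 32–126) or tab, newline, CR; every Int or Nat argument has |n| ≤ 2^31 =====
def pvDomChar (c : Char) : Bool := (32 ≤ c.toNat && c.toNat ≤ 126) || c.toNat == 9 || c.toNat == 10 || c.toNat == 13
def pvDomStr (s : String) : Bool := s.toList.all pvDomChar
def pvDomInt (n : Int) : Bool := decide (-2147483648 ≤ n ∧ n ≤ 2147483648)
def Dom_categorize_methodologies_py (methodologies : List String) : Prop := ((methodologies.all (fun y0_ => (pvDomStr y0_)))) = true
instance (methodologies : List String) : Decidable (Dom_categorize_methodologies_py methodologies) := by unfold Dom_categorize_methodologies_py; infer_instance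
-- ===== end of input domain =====

-- B is category-major: for each category in order it counts matches in a shrinking pool
-- of lowercased strings and filters them out, survivors being "other" (alternative; same cost).

-- ===== PORT A =====
-- one loop iteration of A: lowercase, if/elif chain incrementing the matching counter
def catStepA (d : PySem.Dict String Int) (m : String) : PySem.Dict String Int :=
  let ml := PySem.Str.lower m
  if ["experiment", "trial", "test"].any (fun w => PySem.Str.isIn w ml) then
    d.modify "experimental" 0 (· + 1)
  else if ["observe", "survey", "interview"].any (fun w => PySem.Str.isIn w ml) then
    d.modify "observational" 0 (· + 1)
  else if ["theory", "model", "framework"].any (fun w => PySem.Str.isIn w ml) then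
    d.modify "theoretical" 0 (· + 1)
  else if ["review", "meta-analysis", "systematic"].any (fun w => PySem.Str.isIn w ml) then
    d.modify "review" 0 (· + 1)
  else if ["case", "study", "example"].any (fun w => PySem.Str.isIn w ml) then
    d.modify "case_study" 0 (· + 1)
  else
    d.modify "other" 0 (· + 1)

def categorize_methodologies_py (methodologies : List String) : List (String × Int) :=
  (methodologies.foldl catStepA
    (PySem.Dict.ofList
      [("experimental", 0), ("observational", 0), ("theoretical", 0),
       ("review", 0), ("case_study", 0), ("other", 0)])).items

-- ===== PORT B =====
def pvTable : List (String × List String) :=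
  [("experimental", ["experiment", "trial", "test"]),
   ("observational", ["observe", "survey", "interview"]),
   ("theoretical", ["theory", "model", "framework"]),
   ("review", ["review", "meta-analysis", "systematic"]),
   ("case_study", ["case", "study", "example"])]

def matchAny (words : List String) (t : String) : Bool :=
  words.any (fun w => PySem.Str.isIn w t)

-- the for-loop over the table, carrying the remaining pool; output pairs in table order
def stageGo : List (String × List String) → List String → List (String × Int)
  | [], remaining => [("other", (remaining.length : Int))]
  | (category, words) :: rest, remaining =>
      (category, (remaining.countP (matchAny words) : Int)) ::
      stageGo rest (remaining.filter (fun t => ! matchAny words t))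

def categorize_methodologies_py_alt (methodologies : List String) : List (String × Int) :=
  stageGo pvTable (methodologies.map PySem.Str.lower)

-- ===== PRECONDITION & SPEC =====
def Spec_categorize_methodologies_py (methodologies : List String) (out : List (String × Int)) : Prop := out = categorize_methodologies_py_alt methodologies
instance (methodologies : List String) (out : List (String × Int)) : Decidable (Spec_categorize_methodologies_py methodologies out) := by unfold Spec_categorize_methodologies_py; infer_instance

-- ===== CLAIM (what is proved, stated in full; the proofs are below) =====
def Claim_equal_categorize_methodologies_py : Prop := ∀ (methodologies : List String), Dom_categorize_methodologies_py methodologies → Spec_categorize_methodologies_py methodologies (categorize_methodologies_py methodologies)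

-- ===== LEMMAS AND PROOFS =====

-- the six-counter dict A's loop maintains
def mkD (a b c d e f : Int) : PySem.Dict String Int :=
  PySem.Dict.mk
    [("experimental", a), ("observational", b), ("theoretical", c),
     ("review", d), ("case_study", e), ("other", f)]

-- the disjoint predicates "classified into stage i" on a lowered string
def q1 (t : String) : Bool := matchAny ["experiment", "trial", "test"] t
def q2 (t : String) : Bool := !q1 t && matchAny ["observe", "survey", "interview"] t
def q3 (t : String) : Bool := !q1 t && !matchAny ["observe", "survey", "interview"] t && matchAny ["theory", "model", "framework"] t
def q4 (t : String) : Bool := !q1 t && !matchAny ["observe", "survey", "interview"] t && !matchAny ["theory", "model", "framework"] t && matchAny ["review", "meta-analysis", "systematic"] t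
def q5 (t : String) : Bool := !q1 t && !matchAny ["observe", "survey", "interview"] t && !matchAny ["theory", "model", "framework"] t && !matchAny ["review", "meta-analysis", "systematic"] t && matchAny ["case", "study", "example"] t
def q6 (t : String) : Bool := !q1 t && !matchAny ["observe", "survey", "interview"] t && !matchAny ["theory", "model", "framework"] t && !matchAny ["review", "meta-analysis", "systematic"] t && !matchAny ["case", "study", "example"] t

lemma catStepA_mkD (a b c d e f : Int) (m : String) :
    catStepA (mkD a b c d e f) m =
      if q1 (PySem.Str.lower m) then mkD (a + 1) b c d e f
      else if q2 (PySem.Str.lower m) then mkD a (b + 1) c d e f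
      else if q3 (PySem.Str.lower m) then mkD a b (c + 1) d e f
      else if q4 (PySem.Str.lower m) then mkD a b c (d + 1) e f
      else if q5 (PySem.Str.lower m) then mkD a b c d (e + 1) f
      else mkD a b c d e (f + 1) := by
  simp only [catStepA, q1, q2, q3, q4, q5, matchAny]
  split_ifs <;> simp_all <;> rfl

lemma loop_mkD (ms : List String) (a b c d e f : Int) :
    ms.foldl catStepA (mkD a b c d e f) =
      mkD (a + ((ms.map PySem.Str.lower).countP q1 : Int))
          (b + ((ms.map PySem.Str.lower).countP q2 : Int))
          (c + ((ms.map PySem.Str.lower).countP q3 : Int))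
          (d + ((ms.map PySem.Str.lower).countP q4 : Int))
          (e + ((ms.map PySem.Str.lower).countP q5 : Int))
          (f + ((ms.map PySem.Str.lower).countP q6 : Int)) := by
  induction ms generalizing a b c d e f with
  | nil => simp
  | cons m ms ih =>
      simp only [List.foldl_cons, catStepA_mkD, List.map_cons, List.countP_cons,
        q1, q2, q3, q4, q5, q6]
      by_cases h1 : matchAny ["experiment", "trial", "test"] (PySem.Str.lower m) <;>
        by_cases h2 : matchAny ["observe", "survey", "interview"] (PySem.Str.lower m) <;>
        by_cases h3 : matchAny ["theory", "model", "framework"] (PySem.Str.lower m) <;>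
        by_cases h4 : matchAny ["review", "meta-analysis", "systematic"] (PySem.Str.lower m) <;>
        by_cases h5 : matchAny ["case", "study", "example"] (PySem.Str.lower m) <;>
        · simp only [h1, h2, h3, h4, h5, if_true, if_false, Bool.not_true, Bool.not_false,
            Bool.true_and, Bool.false_and, Bool.and_true, Bool.and_false, ite_true, ite_false,
            Bool.false_eq_true, Bool.not_eq_true', decide_true, decide_false]
          rw [ih]
          simp only [mkD, PySem.Dict.mk.injEq, List.cons.injEq, Prod.mk.injEq, true_and, and_true]
          repeat' apply And.intro
          all_goals first | rfl | (push_cast; ring)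

-- B's staged filtering, unfolded over the concrete table, counts exactly the qi
lemma stageGo_counts (ts : List String) :
    stageGo pvTable ts =
      [("experimental", (ts.countP q1 : Int)),
       ("observational", (ts.countP q2 : Int)),
       ("theoretical", (ts.countP q3 : Int)),
       ("review", (ts.countP q4 : Int)),
       ("case_study", (ts.countP q5 : Int)),
       ("other", (ts.countP q6 : Int))] := by
  simp only [stageGo, pvTable, List.countP_filter, ← List.countP_eq_length_filter,
    List.cons.injEq, Prod.mk.injEq, Int.natCast_inj, and_true, true_and]
  repeat' apply And.intro
  all_goals
    first
    | rfl
    | (apply List.countP_congr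
       intro t _
       simp only [q1, q2, q3, q4, q5, q6]
       cases matchAny ["experiment", "trial", "test"] t <;>
         cases matchAny ["observe", "survey", "interview"] t <;>
         cases matchAny ["theory", "model", "framework"] t <;>
         cases matchAny ["review", "meta-analysis", "systematic"] t <;>
         cases matchAny ["case", "study", "example"] t <;> rfl)

-- ===== VERDICT (by name: the statement is the Claim_ definition above) =====
theorem categorize_methodologies_py_spec : Claim_equal_categorize_methodologies_py := by
  intro ms _
  show categorize_methodologies_py ms = categorize_methodologies_py_alt ms
  have hinit : PySem.Dict.ofList
      [("experimental", (0:Int)), ("observational", 0), ("theoretical", 0),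
       ("review", 0), ("case_study", 0), ("other", 0)] = mkD 0 0 0 0 0 0 := by rfl
  rw [categorize_methodologies_py, hinit, loop_mkD, categorize_methodologies_py_alt, stageGo_counts]
  simp [mkD]
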